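-- pv_equiv track=rewrite | github.com/jimmy876876/ssq_xuanhao | ssq_analysis.py | compare_with_previous
-- ===== SOURCE A (Python) =====
-- def compare_with_previous(current_numbers, previous_numbers):
--     """比较当前号码与上一期号码的重号和斜号"""
--     if not previous_numbers:
--         return 0, 0
--
--     current = set(int(x) for x in current_numbers.split())
--     previous = set(int(x) for x in previous_numbers.split())
--
--     # 计算重号个数
--     repeat_count = len(current & previous)
--
--     # 计算斜号个数
--     diagonal_count = 0
--     for num in previous:
--         if (num + 1) in current or (num - 1) in current:
--             diagonal_count += 1
--
--     return repeat_count, diagonal_count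
-- ===== SOURCE B (Python) =====
-- def compare_with_previous(current_numbers, previous_numbers):
--     """比较当前号码与上一期号码的重号和斜号"""
--     if not previous_numbers:
--         return 0, 0
--
--     cur = sorted({int(x) for x in current_numbers.split()})
--     prev = sorted({int(x) for x in previous_numbers.split()})
--
--     # two-pointer merge over the two sorted distinct lists
--     repeat_count = diagonal_count = 0
--     j = 0
--     for p in prev:
--         while j < len(cur) and cur[j] < p - 1:
--             j += 1
--         window = cur[j:j + 3]   # the only places p-1, p, p+1 can sit
--         if p in window:
--             repeat_count += 1
--         if p - 1 in window or p + 1 in window: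
--             diagonal_count += 1
--     return repeat_count, diagonal_count
-- ===== Notes on version B (the rewrite author's own statement) =====
-- stated objective: alternative
-- what changed: Instead of hashing (sets with membership tests), B sorts both duplicate-free number lists and computes repeat and diagonal counts in a single two-pointer merge: a pointer into the sorted current list advances past values below p-1 and a 3-element window at the pointer decides whether p, p-1 or p+1 occurs.
-- outside the precondition, e.g. on compare_with_previous('1 x', '2'): A raises ValueError, B raises ValueError
import Mathlib
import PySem

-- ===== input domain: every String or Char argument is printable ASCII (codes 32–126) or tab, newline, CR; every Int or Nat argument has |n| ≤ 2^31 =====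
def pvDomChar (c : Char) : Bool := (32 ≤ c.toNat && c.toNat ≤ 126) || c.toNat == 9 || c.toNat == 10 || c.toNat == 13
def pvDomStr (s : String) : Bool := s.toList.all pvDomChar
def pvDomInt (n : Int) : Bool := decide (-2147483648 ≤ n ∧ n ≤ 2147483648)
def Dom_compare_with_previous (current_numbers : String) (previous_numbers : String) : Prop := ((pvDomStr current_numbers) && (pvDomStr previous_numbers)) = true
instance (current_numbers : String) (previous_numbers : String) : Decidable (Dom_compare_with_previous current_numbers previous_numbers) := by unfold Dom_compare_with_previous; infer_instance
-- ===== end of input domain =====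

-- B replaces A's set-membership scanning by a different algorithm: sort both distinct
-- number lists and count repeats and neighbours in one two-pointer merge (alternative).


-- ===== PORT A =====
-- set(int(x) for x in s.split()); `none` exactly where int() raises ValueError
def pvParseSetA (s : String) : Option (PySem.Set Int) :=
  ((PySem.Str.split₀ s).mapM PySem.Int.ofStr?).map PySem.Set.ofList

def compare_with_previous (current_numbers : String) (previous_numbers : String) : Int × Int :=
  if previous_numbers = "" then (0, 0)
  else
    match pvParseSetA current_numbers, pvParseSetA previous_numbers with
    | some current, some previous =>
      let repeat_count : Int := PySem.Set.len (PySem.Set.inter current previous)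
      -- for num in previous: a count, independent of the set's iteration order
      let diagonal_count : Int := previous.foldl
        (fun acc num =>
          if PySem.Set.contains current (num + 1) || PySem.Set.contains current (num - 1)
          then acc + 1 else acc) 0
      (repeat_count, diagonal_count)
    | _, _ => (0, 0)   -- int() raised: excluded by Pre_

-- ===== PORT B =====
-- sorted({int(x) for x in s.split()}); `none` exactly where int() raises ValueError
def pvParseSortedB (s : String) : Option (List Int) :=
  ((PySem.Str.split₀ s).mapM PySem.Int.ofStr?).map
    (fun ns => PySem.List.sorted (PySem.Set.ofList ns) (fun x => x) false)

-- `while j < len(cur) and cur[j] < p - 1: j += 1` — advancing the pointer = dropping the prefix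
def pvAdvance (cur : List Int) (p : Int) : List Int :=
  match cur with
  | [] => []
  | c :: cs => if c < p - 1 then pvAdvance cs p else c :: cs

-- the `for p in prev` loop: window = cur[j:j+3], count p / p±1 in the window
def pvMerge : List Int → List Int → Int × Int
  | _, [] => (0, 0)
  | cur, p :: ps =>
    let cur' := pvAdvance cur p
    let window := cur'.take 3
    let rest := pvMerge cur' ps
    ((if p ∈ window then 1 else 0) + rest.1,
     (if p - 1 ∈ window ∨ p + 1 ∈ window then 1 else 0) + rest.2)

def compare_with_previous_alt (current_numbers : String) (previous_numbers : String) : Int × Int :=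
  if previous_numbers = "" then (0, 0)
  else
    (Option.bind (pvParseSortedB current_numbers) fun cur =>
      Option.bind (pvParseSortedB previous_numbers) fun prev =>
        some (pvMerge cur prev)).getD (0, 0)   -- none: int() raised, excluded by Pre_

-- ===== PRECONDITION & SPEC =====
-- Pre_ excludes exactly the inputs on which Python's int() raises ValueError on some
-- whitespace-split token (unless previous_numbers is empty, where A returns before parsing).
def Pre_compare_with_previous (current_numbers : String) (previous_numbers : String) : Prop :=
  previous_numbers = "" ∨
    ((PySem.Str.split₀ current_numbers).all (fun t => (PySem.Int.ofStr? t).isSome) = true ∧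
     (PySem.Str.split₀ previous_numbers).all (fun t => (PySem.Int.ofStr? t).isSome) = true)
instance (current_numbers : String) (previous_numbers : String) : Decidable (Pre_compare_with_previous current_numbers previous_numbers) := by unfold Pre_compare_with_previous; infer_instance

def pvWitness_compare_with_previous : String × String := ("1 2 3", "3 4")

def Spec_compare_with_previous (current_numbers : String) (previous_numbers : String) (out : Int × Int) : Prop := out = compare_with_previous_alt current_numbers previous_numbers
instance (current_numbers : String) (previous_numbers : String) (out : Int × Int) : Decidable (Spec_compare_with_previous current_numbers previous_numbers out) := by unfold Spec_compare_with_previous; infer_instance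

-- ===== CLAIM (what is proved, stated in full; the proofs are below) =====
def Claim_equal_compare_with_previous : Prop := ∀ (current_numbers : String) (previous_numbers : String), Dom_compare_with_previous current_numbers previous_numbers → Pre_compare_with_previous current_numbers previous_numbers → Spec_compare_with_previous current_numbers previous_numbers (compare_with_previous current_numbers previous_numbers)

-- ===== LEMMAS AND PROOFS =====

-- pvAdvance keeps exactly the elements ≥ p - 1 (on a strictly sorted list)
theorem pvAdvance_mem {cur : List Int} (h : cur.Pairwise (· < ·)) (p x : Int) :
    x ∈ pvAdvance cur p ↔ x ∈ cur ∧ p - 1 ≤ x := by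
  induction cur with
  | nil => simp [pvAdvance]
  | cons c cs ih =>
    rw [List.pairwise_cons] at h
    by_cases hc : c < p - 1
    · simp only [pvAdvance, if_pos hc, ih h.2, List.mem_cons]
      constructor
      · rintro ⟨hm, hb⟩; exact ⟨Or.inr hm, hb⟩
      · rintro ⟨hm | hm, hb⟩
        · omega
        · exact ⟨hm, hb⟩
    · simp only [pvAdvance, if_neg hc, List.mem_cons]
      constructor
      · rintro (rfl | hm)
        · exact ⟨Or.inl rfl, by omega⟩
        · exact ⟨Or.inr hm, by have := h.1 x hm; omega⟩
      · rintro ⟨hm, _⟩; exact hm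

theorem pvAdvance_pairwise {cur : List Int} (h : cur.Pairwise (· < ·)) (p : Int) :
    (pvAdvance cur p).Pairwise (· < ·) := by
  induction cur with
  | nil => exact List.Pairwise.nil
  | cons c cs ih =>
    rw [List.pairwise_cons] at h
    by_cases hc : c < p - 1
    · simpa [pvAdvance, hc] using ih h.2
    · simpa [pvAdvance, hc] using ⟨h.1, h.2⟩

-- on a strictly sorted list whose elements are all ≥ p - 1, any value ≤ p + 1
-- lies in the list iff it lies in its first three elements
theorem pv_take3_mem {cur : List Int} (h : cur.Pairwise (· < ·)) {p v : Int}
    (hb : ∀ x ∈ cur, p - 1 ≤ x) (hv : v ≤ p + 1) :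
    v ∈ cur.take 3 ↔ v ∈ cur := by
  match cur with
  | [] => simp
  | [a] => simp [List.take]
  | [a, b] => simp [List.take]
  | a :: b :: c :: rest =>
    have ht : (a :: b :: c :: rest).take 3 = [a, b, c] := rfl
    rw [ht]
    simp only [List.mem_cons, List.not_mem_nil, or_false]
    constructor
    · tauto
    · rintro (rfl | rfl | rfl | hm)
      · exact Or.inl rfl
      · exact Or.inr (Or.inl rfl)
      · exact Or.inr (Or.inr rfl)
      · exfalso
        have ha : p - 1 ≤ a := hb a (by simp)
        have hab : a < b := by
          have := List.pairwise_cons.1 h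
          exact this.1 b (by simp)
        have hbc : b < c := by
          have := List.pairwise_cons.1 (List.pairwise_cons.1 h).2
          exact this.1 c (by simp)
        have hcv : c < v := by
          have h2 := (List.pairwise_cons.1 (List.pairwise_cons.1
            (List.pairwise_cons.1 h).2).2).1
          exact h2 v hm
        omega

-- the merge computes the two membership counts (both lists strictly sorted)
theorem pvMerge_eq (ps : List Int) : ∀ (cur : List Int), cur.Pairwise (· < ·) →
    ps.Pairwise (· < ·) →
    pvMerge cur ps =
      ((ps.countP (fun q => decide (q ∈ cur)) : Int),
       (ps.countP (fun q => decide (q - 1 ∈ cur) || decide (q + 1 ∈ cur)) : Int)) := by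
  induction ps with
  | nil => intro cur _ _; simp [pvMerge]
  | cons p ps ih =>
    intro cur hcur hps
    rw [List.pairwise_cons] at hps
    have hcur' := pvAdvance_pairwise hcur p
    have hbnd : ∀ x ∈ pvAdvance cur p, p - 1 ≤ x := by
      intro x hx; exact ((pvAdvance_mem hcur p x).1 hx).2
    have hmem : ∀ v : Int, v ≤ p + 1 → p - 1 ≤ v →
        (v ∈ (pvAdvance cur p).take 3 ↔ v ∈ cur) := by
      intro v h1 h2
      rw [pv_take3_mem hcur' hbnd h1, pvAdvance_mem hcur p v]
      exact ⟨fun h => h.1, fun h => ⟨h, h2⟩⟩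
    have hcnt1 : ps.countP (fun q => decide (q ∈ pvAdvance cur p))
        = ps.countP (fun q => decide (q ∈ cur)) := by
      refine List.countP_congr (fun q hq => ?_)
      have hpq := hps.1 q hq
      have e : (q ∈ pvAdvance cur p) ↔ q ∈ cur := by
        rw [pvAdvance_mem hcur p]
        exact ⟨fun h => h.1, fun h => ⟨h, by omega⟩⟩
      simp [e]
    have hcnt2 : ps.countP (fun q => decide (q - 1 ∈ pvAdvance cur p) || decide (q + 1 ∈ pvAdvance cur p))
        = ps.countP (fun q => decide (q - 1 ∈ cur) || decide (q + 1 ∈ cur)) := by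
      refine List.countP_congr (fun q hq => ?_)
      have hpq := hps.1 q hq
      have e1 : (q - 1 ∈ pvAdvance cur p) ↔ (q - 1 ∈ cur) := by
        rw [pvAdvance_mem hcur p]
        exact ⟨fun h => h.1, fun h => ⟨h, by omega⟩⟩
      have e2 : (q + 1 ∈ pvAdvance cur p) ↔ (q + 1 ∈ cur) := by
        rw [pvAdvance_mem hcur p]
        exact ⟨fun h => h.1, fun h => ⟨h, by omega⟩⟩
      simp [e1, e2]
    simp only [pvMerge, ih (pvAdvance cur p) hcur' hps.2, hcnt1, hcnt2,
      List.countP_cons]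
    have w1 : (p ∈ (pvAdvance cur p).take 3) ↔ p ∈ cur := hmem p (by omega) (by omega)
    have w2 : (p - 1 ∈ (pvAdvance cur p).take 3) ↔ p - 1 ∈ cur := hmem (p - 1) (by omega) (by omega)
    have w3 : (p + 1 ∈ (pvAdvance cur p).take 3) ↔ p + 1 ∈ cur := hmem (p + 1) (by omega) (by omega)
    simp only [w1, w2, w3, Prod.mk.injEq, decide_eq_true_eq, Bool.or_eq_true]
    constructor <;> push_cast <;> split_ifs <;> simp_all <;> omega

-- |a ∩ b| is symmetric for duplicate-free lists
theorem pv_countP_mem_comm (a b : List Int) (ha : a.Nodup) (hb : b.Nodup) :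
    a.countP (fun x => decide (x ∈ b)) = b.countP (fun x => decide (x ∈ a)) := by
  have key : ∀ (u v : List Int), u.Nodup → v.Nodup →
      u.countP (fun x => decide (x ∈ v)) = (u.toFinset ∩ v.toFinset).card := by
    intro u v hu hv
    rw [List.countP_eq_length_filter]
    have hnd : (u.filter (fun x => decide (x ∈ v))).Nodup := hu.filter _
    rw [← List.toFinset_card_of_nodup hnd, List.toFinset_filter]
    congr 1
    ext x
    simp [Finset.mem_inter, List.mem_toFinset]
  rw [key a b ha hb, key b a hb ha, Finset.inter_comm]

-- ===== VERDICT (by name: the statement is the Claim_ definition above) =====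
theorem compare_with_previous_spec : Claim_equal_compare_with_previous := by
  intro c p _ _
  unfold Spec_compare_with_previous compare_with_previous compare_with_previous_alt
  by_cases hp : p = ""
  · simp [hp]
  · simp only [hp, if_false, pvParseSortedB, pvParseSetA]
    cases hc : (PySem.Str.split₀ c).mapM PySem.Int.ofStr? with
    | none => rfl
    | some cns =>
      cases hpp : (PySem.Str.split₀ p).mapM PySem.Int.ofStr? with
      | none => rfl
      | some pns =>
        simp only [Option.map_some, Option.bind_some, Option.getD_some]
        have hscur := PySem.List.sorted_ofList_pairwise_lt (xs := cns)
        have hsprev := PySem.List.sorted_ofList_pairwise_lt (xs := pns)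
        rw [pvMerge_eq _ _ hscur hsprev]
        have hmc : ∀ x : Int,
            x ∈ PySem.List.sorted (PySem.Set.ofList cns) (fun x => x) false
              ↔ x ∈ PySem.Set.ofList cns := by
          intro x; simp [PySem.List.mem_sorted]
        have hperm : (PySem.List.sorted (PySem.Set.ofList pns) (fun x => x) false).Perm
            (PySem.Set.ofList pns) :=
          PySem.List.sorted_perm (PySem.Set.ofList pns) (fun x => x) false
        -- first component: |current ∩ previous|
        have h1 : PySem.Set.len (PySem.Set.inter (PySem.Set.ofList cns) (PySem.Set.ofList pns))
            = (((PySem.List.sorted (PySem.Set.ofList pns) (fun x => x) false).countP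
                (fun q => decide (q ∈ PySem.List.sorted (PySem.Set.ofList cns) (fun x => x) false)) : Nat) : Int) := by
          rw [hperm.countP_eq]
          have e : (PySem.Set.ofList pns).countP
              (fun q => decide (q ∈ PySem.List.sorted (PySem.Set.ofList cns) (fun x => x) false))
              = (PySem.Set.ofList pns).countP (fun q => decide (q ∈ PySem.Set.ofList cns)) :=
            List.countP_congr (fun q _ => by simp [hmc q])
          rw [e, ← pv_countP_mem_comm (PySem.Set.ofList cns) (PySem.Set.ofList pns)
              (PySem.Set.nodup_ofList cns) (PySem.Set.nodup_ofList pns)]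
          simp [PySem.Set.len, PySem.Set.inter, List.countP_eq_length_filter]
        -- second component: the diagonal count
        have h2 : (PySem.Set.ofList pns).foldl
            (fun acc num =>
              if PySem.Set.contains (PySem.Set.ofList cns) (num + 1)
                  || PySem.Set.contains (PySem.Set.ofList cns) (num - 1)
              then acc + 1 else acc) (0 : Int)
            = (((PySem.List.sorted (PySem.Set.ofList pns) (fun x => x) false).countP
                (fun q => decide (q - 1 ∈ PySem.List.sorted (PySem.Set.ofList cns) (fun x => x) false)
                  || decide (q + 1 ∈ PySem.List.sorted (PySem.Set.ofList cns) (fun x => x) false)) : Nat) : Int) := by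
          rw [PySem.List.foldl_if_add_one, zero_add]
          rw [hperm.countP_eq]
          congr 1
          refine List.countP_congr (fun q _ => ?_)
          simp only [hmc]
          rw [Bool.eq_iff_iff]
          simp [Bool.or_comm]
        exact Prod.ext h1 h2
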